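-- pv_equiv track=rewrite | github.com/chaorenex1/coding-agent-workflow | skills/git-batch-commit/git_analyzer.py | group_files_by_feature
-- ===== SOURCE A (Python) =====
-- from typing import Dict, List, Any, Tuple
--
-- def group_files_by_feature(file_analyses: List[Dict[str, Any]]) -> List[List[Dict[str, Any]]]:
--     """
--     Group files by feature/functionality rather than just directory.
--
--     Args:
--         file_analyses: List of file analysis results
--
--     Returns:
--         List of file groups (batches)
--     """
--     # Group by (change_type, scope) combination
--     groups = {}
--
--     for analysis in file_analyses:
--         change_type = analysis.get('change_type', 'chore')
--         scope = analysis.get('scope', 'general')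
--
--         key = f"{change_type}:{scope}"
--
--         if key not in groups:
--             groups[key] = []
--
--         groups[key].append(analysis)
--
--     # Convert to list of batches
--     batches = list(groups.values())
--
--     # Sort batches by priority (feat > fix > docs > refactor > chore > style > test)
--     priority_order = ['feat', 'fix', 'perf', 'docs', 'refactor', 'chore', 'style', 'test']
--
--     def batch_priority(batch):
--         change_type = batch[0].get('change_type', 'chore')
--         try:
--             return priority_order.index(change_type)
--         except ValueError:
--             return 999
--
--     batches.sort(key=batch_priority)
--
--     return batches
-- ===== SOURCE B (Python) =====
-- from typing import Dict, List, Any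
--
-- def group_files_by_feature(file_analyses: List[Dict[str, Any]]) -> List[List[Dict[str, Any]]]:
--     """Group files by (change_type, scope); emit batches in priority order via
--     counting buckets instead of a comparison sort."""
--     priority_order = ['feat', 'fix', 'perf', 'docs', 'refactor', 'chore', 'style', 'test']
--     groups = {}                                   # key -> list of analyses
--     buckets = [[] for _ in range(len(priority_order) + 1)]   # per-priority lists of keys
--     for analysis in file_analyses:
--         change_type = analysis.get('change_type', 'chore')
--         scope = analysis.get('scope', 'general')
--         key = f"{change_type}:{scope}"
--         if key not in groups:
--             groups[key] = []
--             try: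
--                 p = priority_order.index(change_type)
--             except ValueError:
--                 p = len(priority_order)
--             buckets[p].append(key)
--         groups[key].append(analysis)
--     return [groups[k] for bucket in buckets for k in bucket]
-- ===== Notes on version B (the rewrite author's own statement) =====
-- stated objective: alternative
-- what changed: A groups into a dict and then comparison-sorts the batch list with a priority key function; B assigns each group to one of nine fixed priority buckets at group creation (a counting-sort) and emits the buckets in order, with no sort call.
import Mathlib
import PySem

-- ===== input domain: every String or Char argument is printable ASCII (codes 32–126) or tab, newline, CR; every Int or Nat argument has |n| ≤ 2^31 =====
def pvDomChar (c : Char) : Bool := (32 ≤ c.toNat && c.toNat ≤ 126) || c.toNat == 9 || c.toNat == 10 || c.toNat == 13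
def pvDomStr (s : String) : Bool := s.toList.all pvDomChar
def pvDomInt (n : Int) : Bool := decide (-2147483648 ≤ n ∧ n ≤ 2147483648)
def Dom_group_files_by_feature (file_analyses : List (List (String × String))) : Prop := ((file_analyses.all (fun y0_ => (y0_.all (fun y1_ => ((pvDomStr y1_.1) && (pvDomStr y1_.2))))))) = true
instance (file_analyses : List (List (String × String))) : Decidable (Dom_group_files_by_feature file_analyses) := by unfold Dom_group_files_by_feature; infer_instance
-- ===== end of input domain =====

-- B replaces A's comparison sort of the batch list by nine fixed priority buckets
-- filled at group creation (a counting sort); same batches, same order, no sort call.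

-- ===== PORT A =====
-- shared line-for-line helpers (both Pythons contain these same expressions):
-- analysis.get('change_type', 'chore') / analysis.get('scope', 'general') / f"{change_type}:{scope}"
def pvPriorityOrder : List String := ["feat", "fix", "perf", "docs", "refactor", "chore", "style", "test"]
def pvCT (a : List (String × String)) : String := (PySem.Dict.ofList a).getD "change_type" "chore"
def pvSC (a : List (String × String)) : String := (PySem.Dict.ofList a).getD "scope" "general"
def pvKey (a : List (String × String)) : String := pvCT a ++ ":" ++ pvSC a

-- def batch_priority(batch): batch[0] is always in range (groups are built non-empty),
-- so pyGetD with default [] is exact here; try/except ValueError around .index → match on index?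
def pvBatchPriority (batch : List (List (String × String))) : Int :=
  let ct := pvCT (PySem.List.pyGetD batch 0 [])
  match PySem.List.index? pvPriorityOrder ct with
  | some k => (k : Int)
  | none => 999

def group_files_by_feature (file_analyses : List (List (String × String))) : List (List (List (String × String))) :=
  let groups := file_analyses.foldl (fun groups a =>
      let key := pvKey a
      -- if key not in groups: groups[key] = []
      let groups := if groups.contains key then groups else groups.insert key ([] : List (List (String × String)))
      -- groups[key].append(analysis)
      groups.insert key (groups.getD key [] ++ [a]))
    PySem.Dict.empty
  let batches := groups.values
  PySem.List.sorted batches pvBatchPriority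

-- ===== PORT B =====
def group_files_by_feature_alt (file_analyses : List (List (String × String))) : List (List (List (String × String))) :=
  let st := file_analyses.foldl (fun (st : PySem.Dict String (List (List (String × String))) × List (List String)) a =>
      let key := pvKey a
      if st.1.contains key then
        -- groups[key].append(analysis)
        (st.1.insert key (st.1.getD key [] ++ [a]), st.2)
      else
        -- groups[key] = []; p = priority_order.index(ct) (or len on ValueError); buckets[p].append(key)
        let groups := st.1.insert key ([] : List (List (String × String)))
        let p : Nat := (PySem.List.index? pvPriorityOrder (pvCT a)).getD pvPriorityOrder.length
        (groups.insert key (groups.getD key [] ++ [a]), st.2.set p (st.2.getD p [] ++ [key])))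
    (PySem.Dict.empty, List.replicate (pvPriorityOrder.length + 1) [])
  st.2.flatten.map (fun k => st.1.getD k [])

-- ===== PRECONDITION & SPEC =====
def Spec_group_files_by_feature (file_analyses : List (List (String × String))) (out : List (List (List (String × String)))) : Prop := out = group_files_by_feature_alt file_analyses
instance (file_analyses : List (List (String × String))) (out : List (List (List (String × String)))) : Decidable (Spec_group_files_by_feature file_analyses out) := by unfold Spec_group_files_by_feature; infer_instance

-- ===== CLAIM (what is proved, stated in full; the proofs are below) =====
def Claim_equal_group_files_by_feature : Prop := ∀ (file_analyses : List (List (String × String))), Dom_group_files_by_feature file_analyses → Spec_group_files_by_feature file_analyses (group_files_by_feature file_analyses)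


-- ===== LEMMAS AND PROOFS =====

-- proof-only abbreviations
def pvPrEl (a : List (String × String)) : Int :=
  match PySem.List.index? pvPriorityOrder (pvCT a) with
  | some k => (k : Int)
  | none => 999

def pvBIdx (a : List (String × String)) : Nat :=
  (PySem.List.index? pvPriorityOrder (pvCT a)).getD 8

def pvBatch (xs : List (List (String × String))) (k : String) : List (List (String × String)) :=
  xs.filter (fun a => pvKey a == k)

def pvKeys (xs : List (List (String × String))) : List String :=
  PySem.Set.ofList (xs.map pvKey)

def pvPrK (xs : List (List (String × String))) (k : String) : Int := pvPrEl ((pvBatch xs k).headD [])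
def pvBIK (xs : List (List (String × String))) (k : String) : Nat := pvBIdx ((pvBatch xs k).headD [])

def pvGroups (xs : List (List (String × String))) : PySem.Dict String (List (List (String × String))) :=
  xs.foldl (fun d a => d.modify (pvKey a) [] (· ++ [a])) PySem.Dict.empty

def pvPS : List Int := [0, 1, 2, 3, 4, 5, 6, 7, 999]

-- generic insertBy facts used for the stable-sort decomposition
theorem pv_insertBy_append_left {α : Type} (b : α → α → Bool) (x : α) (ys zs : List α)
    (h : ∀ y ∈ ys, b x y = false) :
    PySem.List.insertBy b x (ys ++ zs) = ys ++ PySem.List.insertBy b x zs := by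
  induction ys with
  | nil => rfl
  | cons y ys ih =>
    have hy : b x y = false := h y (by simp)
    simp [PySem.List.insertBy, hy, ih (fun y hy => h y (by simp [hy]))]

theorem pv_insertBy_all_before {α : Type} (b : α → α → Bool) (x : α) (zs : List α)
    (h : ∀ y ∈ zs, b x y = true) :
    PySem.List.insertBy b x zs = x :: zs := by
  cases zs with
  | nil => rfl
  | cons y ys => simp [PySem.List.insertBy, h y (by simp)]

-- a stable sort whose key takes values in a strictly increasing list ps is the
-- concatenation of the key-buckets in ps-order
theorem pv_sorted_bucket {α : Type} (l : List α) (key : α → Int) (ps : List Int)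
    (hps : ps.Pairwise (· < ·)) (hall : ∀ x ∈ l, key x ∈ ps) :
    PySem.List.sorted l key = ps.flatMap (fun v => l.filter (fun x => key x == v)) := by
  induction l using List.reverseRecOn with
  | nil =>
    have h0 : PySem.List.sorted ([] : List α) key = [] := rfl
    simp [h0]
  | append_singleton l a ih =>
    have hsval : PySem.List.sorted (l ++ [a]) key
        = PySem.List.insertBy (fun p q => decide (key p < key q)) a (PySem.List.sorted l key) := by
      rw [PySem.List.sorted_eq_foldl_insertBy (l ++ [a]) key, List.foldl_append,
        ← PySem.List.sorted_eq_foldl_insertBy l key]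
      rfl
    rw [hsval, ih (fun x hx => hall x (by simp [hx]))]
    obtain ⟨P1, P2, hsplit⟩ := List.append_of_mem (hall a (by simp))
    subst hsplit
    rw [List.pairwise_append] at hps
    obtain ⟨hP1, hcons, hbet⟩ := hps
    rw [List.pairwise_cons] at hcons
    obtain ⟨h2, _⟩ := hcons
    have h1 : ∀ u ∈ P1, u < key a := fun u hu => hbet u hu (key a) (by simp)
    have hmemF : ∀ (u : Int) (y : α), y ∈ l.filter (fun x => key x == u) → key y = u := by
      intro u y hy
      have h := List.of_mem_filter hy
      simpa using h
    rw [List.flatMap_append, List.flatMap_cons]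
    rw [pv_insertBy_append_left _ _ _ _ (by
      intro y hy
      obtain ⟨u, hu, hyu⟩ := List.mem_flatMap.mp hy
      have hky := hmemF u y hyu
      have := h1 u hu
      simp only [decide_eq_false_iff_not]
      omega)]
    rw [pv_insertBy_append_left _ _ _ _ (by
      intro y hy
      have hky := hmemF (key a) y hy
      simp only [decide_eq_false_iff_not]
      omega)]
    rw [pv_insertBy_all_before _ _ _ (by
      intro y hy
      obtain ⟨u, hu, hyu⟩ := List.mem_flatMap.mp hy
      have hky := hmemF u y hyu
      have := h2 u hu
      simp only [decide_eq_true_eq]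
      omega)]
    have hF1 : (P1.flatMap fun v => (l ++ [a]).filter (fun x => key x == v))
        = P1.flatMap fun v => l.filter (fun x => key x == v) := by
      rw [List.flatMap_def, List.flatMap_def]
      congr 1
      apply List.map_congr_left
      intro u hu
      have hne : (key a == u) = false := by
        have := h1 u hu
        simp only [beq_eq_false_iff_ne]
        omega
      simp [List.filter_append, List.filter, hne]
    have hF2 : (P2.flatMap fun v => (l ++ [a]).filter (fun x => key x == v))
        = P2.flatMap fun v => l.filter (fun x => key x == v) := by
      rw [List.flatMap_def, List.flatMap_def]
      congr 1
      apply List.map_congr_left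
      intro u hu
      have hne : (key a == u) = false := by
        have := h2 u hu
        simp only [beq_eq_false_iff_ne]
        omega
      simp [List.filter_append, List.filter, hne]
    have hFa : (l ++ [a]).filter (fun x => key x == key a)
        = l.filter (fun x => key x == key a) ++ [a] := by
      simp [List.filter_append, List.filter]
    rw [List.flatMap_append, List.flatMap_cons, hF1, hF2, hFa]
    simp

theorem pv_insert_insert_self {κ ν : Type} [BEq κ] [LawfulBEq κ] (d : PySem.Dict κ ν) (k : κ) (v w : ν) :
    (d.insert k v).insert k w = d.insert k w := by
  apply PySem.Dict.ext
  by_cases hc : d.contains k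
  · rw [PySem.Dict.items_insert_of_contains _ _ (PySem.Dict.contains_insert_self _ _ _),
      PySem.Dict.items_insert_of_contains _ _ hc, PySem.Dict.items_insert_of_contains _ _ hc,
      List.map_map]
    apply List.map_congr_left
    intro p _
    by_cases hp : (p.1 == k)
    · simp [hp]
    · simp [Function.comp, hp]
  · have hnk : ∀ p ∈ d.items, (p.1 == k) = false := by
      intro p hp
      rw [Bool.eq_false_iff]
      intro hpk
      apply hc
      rw [PySem.Dict.contains_iff_mem_keys]
      have : p.1 = k := eq_of_beq hpk
      exact this ▸ PySem.Dict.mem_keys_of_mem_items _ hp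
    rw [PySem.Dict.items_insert_of_contains _ _ (PySem.Dict.contains_insert_self _ _ _),
      PySem.Dict.items_insert_of_not_contains _ _ (by simpa using hc),
      PySem.Dict.items_insert_of_not_contains _ _ (by simpa using hc),
      List.map_append]
    have hmap : List.map (fun p => if (p.1 == k) = true then (k, w) else p) d.items = d.items := by
      have := List.map_congr_left (l := d.items)
        (f := fun p => if (p.1 == k) = true then (k, w) else p) (g := id)
        (by intro p hp; simp [hnk p hp])
      simpa using this
    rw [hmap]
    simp

-- A's loop body is exactly a modify step
theorem pv_stepA_eq (d : PySem.Dict String (List (List (String × String)))) (a : List (String × String)) :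
    (let key := pvKey a;
     let d := if d.contains key then d else d.insert key ([] : List (List (String × String)));
     d.insert key (d.getD key [] ++ [a])) = d.modify (pvKey a) [] (· ++ [a]) := by
  by_cases hc : d.contains (pvKey a) = true
  · simp only [hc, if_true]
    simp [PySem.Dict.modify]
  · simp only [Bool.not_eq_true] at hc
    simp only [hc, Bool.false_eq_true, if_false]
    rw [PySem.Dict.getD_insert_self, pv_insert_insert_self]
    simp [PySem.Dict.modify, PySem.Dict.getD_of_not_contains _ _ hc]

theorem pv_getD_groups (xs : List (List (String × String))) (k : String) :
    (pvGroups xs).getD k [] = pvBatch xs k := by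
  unfold pvGroups pvBatch
  have hm : xs.foldl (fun d a => d.modify (pvKey a) [] (· ++ [a])) PySem.Dict.empty
      = (xs.map (fun a => (pvKey a, a))).foldl (fun d p => d.modify p.1 [] (· ++ [p.2])) PySem.Dict.empty := by
    rw [List.foldl_map]
  rw [hm, PySem.Dict.getD_foldl_modify_append, List.filter_map, List.map_map]
  simp only [Function.comp_def]
  simp [PySem.Dict.getD_empty]

theorem pv_keys_groups (xs : List (List (String × String))) : (pvGroups xs).keys = pvKeys xs := by
  unfold pvGroups pvKeys
  rw [PySem.Dict.keys_foldl_modify_key xs pvKey [] (fun _ a => (· ++ [a])) PySem.Dict.empty]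
  simp [PySem.Dict.keys_empty, PySem.Set.update_nil_left]

theorem pv_nodup_keys_groups (xs : List (List (String × String))) : (pvGroups xs).keys.Nodup := by
  unfold pvGroups
  exact PySem.Dict.nodup_keys_foldl_modify_key xs pvKey [] (fun _ a => (· ++ [a]))
    PySem.Dict.empty (by simp [PySem.Dict.keys_empty])

theorem pv_values_eq {κ : Type} [BEq κ] [LawfulBEq κ] {ν : Type} (d : PySem.Dict κ ν) (d0 : ν)
    (h : d.keys.Nodup) : d.values = d.keys.map (fun k => d.getD k d0) := by
  rw [show d.values = d.items.map (·.2) from rfl, show d.keys = d.items.map (·.1) from rfl,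
    List.map_map]
  apply List.map_congr_left
  intro p hp
  have hp' : (p.1, p.2) ∈ d.items := by simpa using hp
  exact (PySem.Dict.getD_of_mem_items d hp' h d0).symm

theorem pv_bp_headD (b : List (List (String × String))) : pvBatchPriority b = pvPrEl (b.headD []) := by
  cases b with
  | nil => rfl
  | cons y t =>
    simp only [pvBatchPriority, pvPrEl, PySem.List.pyGetD_ofNat']
    rfl

theorem pv_dichotomy (a : List (String × String)) :
    (pvPrEl a = 999 ∧ pvBIdx a = 8) ∨ ∃ k : Nat, k < 8 ∧ pvPrEl a = (k : Int) ∧ pvBIdx a = k := by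
  unfold pvPrEl pvBIdx
  rcases h : PySem.List.index? pvPriorityOrder (pvCT a) with _ | k
  · left
    simp
  · right
    refine ⟨k, ?_, by simp, by simp⟩
    obtain ⟨pre, suf, hps, hlen, -⟩ := (PySem.List.index?_eq_some_iff _ _ _).mp h
    have h8 : pvPriorityOrder.length = 8 := rfl
    have : pvPriorityOrder.length = pre.length + (suf.length + 1) := by simp [hps]
    omega

theorem pv_batch_append (xs : List (List (String × String))) (a : List (String × String)) (k : String) :
    pvBatch (xs ++ [a]) k = pvBatch xs k ++ if pvKey a == k then [a] else [] := by
  unfold pvBatch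
  rw [List.filter_append]
  congr 1
  by_cases h : (pvKey a == k) = true <;> simp [List.filter, h]

theorem pv_biK_append (xs : List (List (String × String))) (a : List (String × String)) (k : String)
    (hk : k ∈ pvKeys xs) : pvBIK (xs ++ [a]) k = pvBIK xs k := by
  have hne : pvBatch xs k ≠ [] := by
    unfold pvKeys at hk
    rw [PySem.Set.mem_ofList] at hk
    obtain ⟨a', ha', hka⟩ := List.mem_map.mp hk
    intro hnil
    have : a' ∈ pvBatch xs k := List.mem_filter.mpr ⟨ha', by simp [hka]⟩
    simp [hnil] at this
  unfold pvBIK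
  rw [pv_batch_append]
  cases hB : pvBatch xs k with
  | nil => exact absurd hB hne
  | cons y t => simp

theorem pv_biK_new (xs : List (List (String × String))) (a : List (String × String))
    (hk : pvKey a ∉ pvKeys xs) : pvBIK (xs ++ [a]) (pvKey a) = pvBIdx a := by
  have h0 : pvBatch xs (pvKey a) = [] := by
    rw [pvBatch, List.filter_eq_nil_iff]
    intro a' ha' he
    apply hk
    unfold pvKeys
    rw [PySem.Set.mem_ofList]
    exact List.mem_map.mpr ⟨a', ha', eq_of_beq he⟩
  unfold pvBIK
  rw [pv_batch_append, h0]
  simp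

theorem pv_bIdx_lt (a : List (String × String)) : pvBIdx a < 9 := by
  rcases pv_dichotomy a with ⟨-, h⟩ | ⟨k, hk, -, h⟩ <;> omega

-- B's fold invariant: groups is the common grouping dict, bucket i holds (in
-- first-creation order) the keys whose creating element has bucket index i
theorem pv_foldB (xs : List (List (String × String))) :
    (xs.foldl (fun (st : PySem.Dict String (List (List (String × String))) × List (List String)) a =>
      let key := pvKey a
      if st.1.contains key then
        (st.1.insert key (st.1.getD key [] ++ [a]), st.2)
      else
        let groups := st.1.insert key ([] : List (List (String × String)))
        let p : Nat := (PySem.List.index? pvPriorityOrder (pvCT a)).getD pvPriorityOrder.length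
        (groups.insert key (groups.getD key [] ++ [a]), st.2.set p (st.2.getD p [] ++ [key])))
      (PySem.Dict.empty, List.replicate (pvPriorityOrder.length + 1) []))
    = (pvGroups xs, (List.range 9).map (fun i => (pvKeys xs).filter (fun k => pvBIK xs k == i))) := by
  induction xs using List.reverseRecOn with
  | nil =>
    simp only [List.foldl_nil]
    refine Prod.ext rfl ?_
    show List.replicate 9 [] = _
    have : ∀ i : Nat, (pvKeys []).filter (fun k => pvBIK [] k == i) = [] := by
      intro i
      simp [pvKeys, PySem.Set.ofList]
    simp [this, List.map_const']
  | append_singleton xs a ih =>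
    rw [List.foldl_append, ih, List.foldl_cons, List.foldl_nil]
    by_cases hc : (pvGroups xs).contains (pvKey a) = true
    · -- existing key: groups gets the append, buckets unchanged
      have hkmem : pvKey a ∈ pvKeys xs := by
        rw [← pv_keys_groups]
        exact (PySem.Dict.contains_iff_mem_keys _ _).mp hc
      simp only [hc, if_true]
      refine Prod.ext ?_ ?_ <;> dsimp only
      · show (pvGroups xs).insert (pvKey a) ((pvGroups xs).getD (pvKey a) [] ++ [a]) = pvGroups (xs ++ [a])
        unfold pvGroups
        rw [List.foldl_append, List.foldl_cons, List.foldl_nil]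
        rfl
      · show (List.range 9).map _ = (List.range 9).map _
        apply List.map_congr_left
        intro i _
        have hK : pvKeys (xs ++ [a]) = pvKeys xs := by
          unfold pvKeys
          rw [List.map_append, List.map_cons, List.map_nil, PySem.Set.ofList_append_singleton]
          exact PySem.Set.add_of_mem hkmem
        rw [hK]
        apply List.filter_congr
        intro k hk
        rw [pv_biK_append xs a k hk]
    · -- fresh key: groups gains [a], its key goes to bucket pvBIdx a
      simp only [Bool.not_eq_true] at hc
      have hknot : pvKey a ∉ pvKeys xs := by
        rw [← pv_keys_groups]
        intro hmem
        rw [← PySem.Dict.contains_iff_mem_keys] at hmem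
        simp [hc] at hmem
      simp only [hc, Bool.false_eq_true, if_false]
      have hpidx : (PySem.List.index? pvPriorityOrder (pvCT a)).getD pvPriorityOrder.length = pvBIdx a := rfl
      have hKnew : pvKeys (xs ++ [a]) = pvKeys xs ++ [pvKey a] := by
        unfold pvKeys
        rw [List.map_append, List.map_cons, List.map_nil, PySem.Set.ofList_append_singleton]
        exact PySem.Set.add_of_not_mem hknot
      refine Prod.ext ?_ ?_ <;> dsimp only
      · show ((pvGroups xs).insert (pvKey a) []).insert (pvKey a)
            (((pvGroups xs).insert (pvKey a) []).getD (pvKey a) [] ++ [a]) = pvGroups (xs ++ [a])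
        rw [PySem.Dict.getD_insert_self, pv_insert_insert_self]
        have hc2 := hc
        unfold pvGroups at hc2 ⊢
        rw [List.foldl_append, List.foldl_cons, List.foldl_nil]
        simp only [PySem.Dict.modify] at hc2 ⊢
        rw [PySem.Dict.getD_of_not_contains _ _ hc2]
      · show ((List.range 9).map _).set _ (((List.range 9).map _).getD _ [] ++ [pvKey a]) = (List.range 9).map _
        rw [hpidx]
        have hlt : pvBIdx a < 9 := pv_bIdx_lt a
        have hlen : ((List.range 9).map (fun i => (pvKeys xs).filter (fun k => pvBIK xs k == i))).length = 9 := by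
          simp
        have hgetD : ((List.range 9).map (fun i => (pvKeys xs).filter (fun k => pvBIK xs k == i))).getD (pvBIdx a) []
            = (pvKeys xs).filter (fun k => pvBIK xs k == pvBIdx a) := by
          rw [List.getD_eq_getElem _ _ (by simp [hlt])]
          simp
        rw [hgetD]
        apply List.ext_getElem (by simp)
        intro i hi1 hi2
        have hi9 : i < 9 := by simpa using hi2
        rw [List.getElem_set]
        simp only [List.getElem_map, List.getElem_range]
        rw [hKnew, List.filter_append]
        have hold : (pvKeys xs).filter (fun k => pvBIK (xs ++ [a]) k == i)
            = (pvKeys xs).filter (fun k => pvBIK xs k == i) := by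
          apply List.filter_congr
          intro k hk
          rw [pv_biK_append xs a k hk]
        have hnewk : pvBIK (xs ++ [a]) (pvKey a) = pvBIdx a := pv_biK_new xs a hknot
        rw [hold]
        by_cases hip : pvBIdx a = i
        · simp only [hip, if_true]
          have hf1 : List.filter (fun k => pvBIK (xs ++ [a]) k == i) [pvKey a] = [pvKey a] := by
            simp [List.filter, hnewk, hip]
          rw [hf1]
        · simp only [hip, if_false]
          have hf0 : List.filter (fun k => pvBIK (xs ++ [a]) k == i) [pvKey a] = [] := by
            simp only [List.filter, hnewk]
            rw [beq_false_of_ne hip]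
          rw [hf0, List.append_nil]

theorem pv_A_eq (xs : List (List (String × String))) :
    group_files_by_feature xs
      = pvPS.flatMap (fun v => ((pvKeys xs).filter (fun k => pvPrK xs k == v)).map (pvBatch xs)) := by
  unfold group_files_by_feature
  have hstep : (fun (groups : PySem.Dict String (List (List (String × String)))) (a : List (String × String)) =>
      let key := pvKey a
      let groups := if groups.contains key then groups else groups.insert key ([] : List (List (String × String)))
      groups.insert key (groups.getD key [] ++ [a]))
      = fun d a => d.modify (pvKey a) [] (· ++ [a]) :=
    funext fun d => funext fun a => pv_stepA_eq d a
  rw [hstep]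
  have hvals : (pvGroups xs).values = (pvKeys xs).map (pvBatch xs) := by
    rw [pv_values_eq (pvGroups xs) [] (pv_nodup_keys_groups xs), pv_keys_groups]
    exact List.map_congr_left fun k _ => pv_getD_groups xs k
  show PySem.List.sorted (pvGroups xs).values pvBatchPriority = _
  rw [hvals]
  rw [pv_sorted_bucket ((pvKeys xs).map (pvBatch xs)) pvBatchPriority pvPS (by decide) ?hall]
  case hall =>
    intro b hb
    obtain ⟨k, -, rfl⟩ := List.mem_map.mp hb
    rw [pv_bp_headD]
    rcases pv_dichotomy ((pvBatch xs k).headD []) with ⟨h9, -⟩ | ⟨m, hm, hpr, -⟩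
    · rw [h9]; simp [pvPS]
    · rw [hpr]
      simp only [pvPS, List.mem_cons, List.not_mem_nil, or_false]
      omega
  rw [List.flatMap_def, List.flatMap_def]
  congr 1
  apply List.map_congr_left
  intro v _
  rw [List.filter_map]
  congr 1
  apply List.filter_congr
  intro k _
  simp only [Function.comp_def]
  rw [pv_bp_headD]
  rfl

theorem pv_B_eq (xs : List (List (String × String))) :
    group_files_by_feature_alt xs
      = (List.range 9).flatMap (fun i => ((pvKeys xs).filter (fun k => pvBIK xs k == i)).map (pvBatch xs)) := by
  unfold group_files_by_feature_alt
  rw [pv_foldB]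
  show (((List.range 9).map fun i => (pvKeys xs).filter (fun k => pvBIK xs k == i)).flatten).map
      (fun k => (pvGroups xs).getD k []) = _
  rw [← List.flatMap_def, List.map_flatMap]
  rw [List.flatMap_def, List.flatMap_def]
  congr 1
  apply List.map_congr_left
  intro i _
  exact List.map_congr_left fun k _ => pv_getD_groups xs k

theorem pv_AB (xs : List (List (String × String))) :
    group_files_by_feature xs = group_files_by_feature_alt xs := by
  rw [pv_A_eq, pv_B_eq]
  have hps : pvPS = (List.range 9).map (fun i : Nat => if i = 8 then (999 : Int) else (i : Int)) := by
    decide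
  rw [hps, List.flatMap_def, List.map_map, ← List.flatMap_def]
  rw [List.flatMap_def, List.flatMap_def]
  congr 1
  apply List.map_congr_left
  intro i hi
  have hi9 : i < 9 := List.mem_range.mp hi
  simp only [Function.comp_def]
  congr 1
  apply List.filter_congr
  intro k _
  simp only [pvPrK, pvBIK]
  rcases pv_dichotomy ((pvBatch xs k).headD []) with ⟨h9, h8⟩ | ⟨m, hm, hpr, hbi⟩
  · rw [h9, h8]
    by_cases h : i = 8
    · simp [h]
    · have h1 : ((999 : Int) == (i : Int)) = false := by
        rw [beq_eq_false_iff_ne]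
        omega
      have h2 : (8 == i) = false := by
        rw [beq_eq_false_iff_ne]
        omega
      simp [h, h1, h2]
  · rw [hpr, hbi]
    by_cases h : i = 8
    · have h1 : ((m : Int) == (999 : Int)) = false := by
        rw [beq_eq_false_iff_ne]
        omega
      have h2 : (m == i) = false := by
        rw [beq_eq_false_iff_ne]
        omega
      simp [h, h1]
      omega
    · simp only [h, if_false]
      by_cases hmi : m = i
      · simp [hmi]
      · have h1 : ((m : Int) == (i : Int)) = false := by
          rw [beq_eq_false_iff_ne]
          exact_mod_cast hmi
        have h2 : (m == i) = false := by
          rw [beq_eq_false_iff_ne]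
          exact hmi
        rw [h1, h2]

-- ===== VERDICT (by name: the statement is the Claim_ definition above) =====
theorem group_files_by_feature_spec : Claim_equal_group_files_by_feature := by
  intro xs _
  unfold Spec_group_files_by_feature
  exact pv_AB xs
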